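-- pv_equiv track=rewrite | github.com/Joohee97124/CodingTest | 프로그래머스/1/42840. 모의고사/모의고사.py | solution
-- ===== SOURCE A (Python) =====
-- def solution(answers):
--     one = [1,2,3,4,5]
--     two = [2, 1, 2, 3, 2, 4, 2, 5]
--     three = [3, 3, 1, 1, 2, 2, 4, 4, 5, 5]
--     score = {1:0, 2:0, 3:0}
--
--     for i,an in enumerate(answers):
--         o = one[i%len(one)]
--         w = two[i%len(two)]
--         h = three[i%len(three)]
--         if an == o:
--             score[1]+=1
--         if an == w:
--             score[2]+=1
--         if an==h:
--             score[3]+=1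
--
--     max_value = max(score.values())
--     max_keys = [k for k,v in score.items() if v==max_value]
--
--     return max_keys
-- ===== SOURCE B (Python) =====
-- def solution(answers):
--     # One pass builds a positional histogram keyed by (i % 40, value)
--     # (40 = lcm of the three pattern periods 5, 8, 10); each score is then
--     # a fixed 40-term table lookup, independent of the input length.
--     cnt = {}
--     for i, a in enumerate(answers):
--         key = (i % 40, a)
--         cnt[key] = cnt.get(key, 0) + 1
--     patterns = [[1, 2, 3, 4, 5],
--                 [2, 1, 2, 3, 2, 4, 2, 5],
--                 [3, 3, 1, 1, 2, 2, 4, 4, 5, 5]]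
--     scores = [sum(cnt.get((r, p[r % len(p)]), 0) for r in range(40)) for p in patterns]
--     best = max(scores)
--     return [k + 1 for k, s in enumerate(scores) if s == best]
-- ===== Notes on version B (the rewrite author's own statement) =====
-- stated objective: alternative
-- what changed: Instead of comparing each answer against the three patterns while scanning (A's fused 3-counter loop), B builds one positional histogram keyed by (i % 40, value) in a pattern-independent pass (40 = lcm of the pattern periods) and then computes each score as a fixed 40-term table-lookup sum.
import Mathlib
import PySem

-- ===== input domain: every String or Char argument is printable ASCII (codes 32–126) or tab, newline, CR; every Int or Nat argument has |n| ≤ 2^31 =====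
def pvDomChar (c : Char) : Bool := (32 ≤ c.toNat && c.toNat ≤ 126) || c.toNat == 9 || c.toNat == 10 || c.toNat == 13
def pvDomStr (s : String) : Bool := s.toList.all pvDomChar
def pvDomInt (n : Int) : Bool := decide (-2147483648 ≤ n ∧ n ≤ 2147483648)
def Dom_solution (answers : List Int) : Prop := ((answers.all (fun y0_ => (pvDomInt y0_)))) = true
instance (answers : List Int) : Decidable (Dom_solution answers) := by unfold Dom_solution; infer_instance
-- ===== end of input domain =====

-- B replaces A's fused per-answer pattern comparison with a pattern-independent positional
-- histogram keyed by (i % 40, value) plus a fixed 40-term lookup sum per pattern (alternative algorithm, same cost).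

-- ===== PORT A =====
-- the body of A's for-loop (score[k] += 1 on an always-present key k = Dict.modify k 0 (·+1));
-- pattern index i % len is always in range, so pyGetD is exact here
def pvStepA (sc : PySem.Dict Int Int) (ia : Int × Int) : PySem.Dict Int Int :=
  let o := PySem.List.pyGetD ([1, 2, 3, 4, 5] : List Int) (ia.1 % (List.length ([1, 2, 3, 4, 5] : List Int) : Int)) 0
  let w := PySem.List.pyGetD ([2, 1, 2, 3, 2, 4, 2, 5] : List Int) (ia.1 % (List.length ([2, 1, 2, 3, 2, 4, 2, 5] : List Int) : Int)) 0
  let h := PySem.List.pyGetD ([3, 3, 1, 1, 2, 2, 4, 4, 5, 5] : List Int) (ia.1 % (List.length ([3, 3, 1, 1, 2, 2, 4, 4, 5, 5] : List Int) : Int)) 0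
  let sc := if ia.2 = o then sc.modify 1 0 (· + 1) else sc
  let sc := if ia.2 = w then sc.modify 2 0 (· + 1) else sc
  if ia.2 = h then sc.modify 3 0 (· + 1) else sc

def solution (answers : List Int) : List Int :=
  let score : PySem.Dict Int Int := PySem.Dict.mk [(1, 0), (2, 0), (3, 0)]
  let score := (PySem.List.enumerate answers).foldl pvStepA score
  -- max(score.values()): values always has 3 entries, so the getD default is never used
  let max_value := (PySem.List.max? score.values (fun y => y)).getD 0
  score.items.filterMap (fun kv => if kv.2 = max_value then some kv.1 else none)

-- ===== PORT B =====
-- cnt[key] = cnt.get(key, 0) + 1 over key = (i % 40, a)  — the histogram-building loop of Source B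
def solution_alt (answers : List Int) : List Int :=
  let cnt : PySem.Dict (Int × Int) Int :=
    (PySem.List.enumerate answers).foldl
      (fun d ia => d.insert (PySem.Int.mod ia.1 40, ia.2)
        (d.getD (PySem.Int.mod ia.1 40, ia.2) 0 + 1))
      PySem.Dict.empty
  let patterns : List (List Int) :=
    [[1, 2, 3, 4, 5], [2, 1, 2, 3, 2, 4, 2, 5], [3, 3, 1, 1, 2, 2, 4, 4, 5, 5]]
  -- sum(cnt.get((r, p[r % len(p)]), 0) for r in range(40))
  let scores := patterns.map (fun p =>
    ((PySem.List.pyRange 0 40 1).map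
      (fun r => cnt.getD (r, PySem.List.pyGetD p (PySem.Int.mod r (List.length p : Int)) 0) 0)).sum)
  -- max(scores): scores always has 3 entries, so the getD default is never used
  let best := (PySem.List.max? scores (fun y => y)).getD 0
  (PySem.List.enumerate scores).filterMap (fun ks => if ks.2 = best then some (ks.1 + 1) else none)

-- ===== PRECONDITION & SPEC =====
def Spec_solution (answers : List Int) (out : List Int) : Prop := out = solution_alt answers
instance (answers : List Int) (out : List Int) : Decidable (Spec_solution answers out) := by unfold Spec_solution; infer_instance

-- ===== CLAIM (what is proved, stated in full; the proofs are below) =====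
def Claim_equal_solution : Prop := ∀ (answers : List Int), Dom_solution answers → Spec_solution answers (solution answers)

-- ===== LEMMAS AND PROOFS =====

-- running score for pattern p over answers enumerated from start s (uses Python's mod via %, exact here: len > 0)
def pvScoreFrom (p : List Int) (s : Int) (answers : List Int) : Int :=
  (PySem.List.enumerate answers s).foldl
    (fun acc ia => acc + (if ia.2 = PySem.List.pyGetD p (ia.1 % (List.length p : Int)) 0 then 1 else 0)) 0

lemma pvFoldAcc (p : List Int) (l : List (Int × Int)) (a : Int) :
    l.foldl (fun acc ia => acc + (if ia.2 = PySem.List.pyGetD p (ia.1 % (List.length p : Int)) 0 then 1 else 0)) a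
      = a + l.foldl (fun acc ia => acc + (if ia.2 = PySem.List.pyGetD p (ia.1 % (List.length p : Int)) 0 then 1 else 0)) 0 := by
  induction l generalizing a with
  | nil => simp
  | cons y l ih =>
      rw [List.foldl_cons, List.foldl_cons, ih, ih (0 + _)]
      ring

lemma pvScoreFrom_cons (p : List Int) (s x : Int) (xs : List Int) :
    pvScoreFrom p s (x :: xs)
      = (if x = PySem.List.pyGetD p (s % (List.length p : Int)) 0 then 1 else 0) + pvScoreFrom p (s + 1) xs := by
  unfold pvScoreFrom
  rw [PySem.List.enumerate_cons, List.foldl_cons, pvFoldAcc]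
  dsimp only
  ring

lemma pvMod1 (a b c : Int) (f : Int → Int) :
    (PySem.Dict.mk [((1 : Int), a), (2, b), (3, c)]).modify 1 0 f
      = PySem.Dict.mk [(1, f a), (2, b), (3, c)] := by rfl

lemma pvMod2 (a b c : Int) (f : Int → Int) :
    (PySem.Dict.mk [((1 : Int), a), (2, b), (3, c)]).modify 2 0 f
      = PySem.Dict.mk [(1, a), (2, f b), (3, c)] := by rfl

lemma pvMod3 (a b c : Int) (f : Int → Int) :
    (PySem.Dict.mk [((1 : Int), a), (2, b), (3, c)]).modify 3 0 f
      = PySem.Dict.mk [(1, a), (2, b), (3, f c)] := by rfl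

lemma pvMk3 (x1 x2 x3 y1 y2 y3 : Int) (h1 : x1 = y1) (h2 : x2 = y2) (h3 : x3 = y3) :
    PySem.Dict.mk [((1 : Int), x1), (2, x2), (3, x3)] = PySem.Dict.mk [(1, y1), (2, y2), (3, y3)] := by
  rw [h1, h2, h3]

-- A's fused dict loop computes the three per-pattern scores
lemma pvMain (xs : List Int) (s a b c : Int) :
    (PySem.List.enumerate xs s).foldl pvStepA (PySem.Dict.mk [(1, a), (2, b), (3, c)])
      = PySem.Dict.mk [(1, a + pvScoreFrom [1, 2, 3, 4, 5] s xs),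
                       (2, b + pvScoreFrom [2, 1, 2, 3, 2, 4, 2, 5] s xs),
                       (3, c + pvScoreFrom [3, 3, 1, 1, 2, 2, 4, 4, 5, 5] s xs)] := by
  induction xs generalizing s a b c with
  | nil => simp [pvScoreFrom]
  | cons x xs ih =>
      rw [PySem.List.enumerate_cons, List.foldl_cons,
        pvScoreFrom_cons, pvScoreFrom_cons, pvScoreFrom_cons]
      simp only [pvStepA]
      split_ifs <;>
        (try simp only [pvMod1, pvMod2, pvMod3]) <;>
        rw [ih] <;>
        exact pvMk3 _ _ _ _ _ _ (by ring) (by ring) (by ring)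

lemma pvItems_mk (l : List (Int × Int)) : (PySem.Dict.mk l).items = l := rfl

-- at most / exactly one residue r in L matches the key (r0, x)
lemma pvSumZero (f : Int → Int) (r0 x : Int) (L : List Int) (h : r0 ∉ L) :
    (L.map (fun r => if (((r0, x) : Int × Int) == (r, f r)) = true then (1 : Int) else 0)).sum = 0 := by
  revert h
  induction L with
  | nil => intro _; simp
  | cons r L ih =>
      intro h
      simp only [List.map_cons, List.sum_cons]
      rw [ih (fun hm => h (List.mem_cons_of_mem _ hm))]
      have hr : ¬ (r0 = r) := by rintro rfl; exact h List.mem_cons_self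
      simp [Prod.ext_iff, hr]

lemma pvSumSingle (f : Int → Int) (r0 x : Int) (L : List Int) (hnd : L.Nodup) (hm : r0 ∈ L) :
    (L.map (fun r => if (((r0, x) : Int × Int) == (r, f r)) = true then (1 : Int) else 0)).sum
      = if x = f r0 then 1 else 0 := by
  revert hnd hm
  induction L with
  | nil => intro _ hm; simp at hm
  | cons r L ih =>
      intro hnd hm
      simp only [List.map_cons, List.sum_cons]
      rcases List.mem_cons.mp hm with he | hm'
      · have h0 : r0 ∉ L := by rw [he]; exact (List.nodup_cons.mp hnd).1
        rw [← he, pvSumZero f r0 x L h0]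
        simp [Prod.ext_iff]
      · have hr : ¬ (r0 = r) := by rintro rfl; exact (List.nodup_cons.mp hnd).1 hm'
        rw [ih (List.nodup_cons.mp hnd).2 hm']
        simp [Prod.ext_iff, hr]

-- B's 40-term lookup sum over the histogram equals the running score for p, for any period dividing 40
lemma pvMainB (p : List Int) (hlen : 0 < (List.length p : Int)) (hdvd : (List.length p : Int) ∣ 40)
    (xs : List Int) (s : Int) (hs : 0 ≤ s) :
    ((PySem.List.pyRange 0 40 1).map (fun r =>
        ((((PySem.List.enumerate xs s).map (fun ia => ((PySem.Int.mod ia.1 40, ia.2) : Int × Int))).count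
            (r, PySem.List.pyGetD p (PySem.Int.mod r (List.length p : Int)) 0) : Nat) : Int))).sum
      = pvScoreFrom p s xs := by
  induction xs generalizing s with
  | nil =>
      simp [pvScoreFrom, PySem.List.enumerate_nil]
  | cons x xs ih =>
      rw [PySem.List.enumerate_cons, List.map_cons]
      have hcount : ∀ r : Int,
          ((((PySem.Int.mod s 40, x) :: (PySem.List.enumerate xs (s + 1)).map
              (fun ia => ((PySem.Int.mod ia.1 40, ia.2) : Int × Int))).count
            (r, PySem.List.pyGetD p (PySem.Int.mod r (List.length p : Int)) 0) : Nat) : Int)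
          = (((PySem.List.enumerate xs (s + 1)).map (fun ia => ((PySem.Int.mod ia.1 40, ia.2) : Int × Int))).count
              (r, PySem.List.pyGetD p (PySem.Int.mod r (List.length p : Int)) 0) : Int)
            + (if ((((PySem.Int.mod s 40, x) : Int × Int)
                  == (r, PySem.List.pyGetD p (PySem.Int.mod r (List.length p : Int)) 0)) = true) then (1 : Int) else 0) := by
        intro r
        rw [List.count_cons]
        split_ifs <;> push_cast <;> ring
      simp only [hcount]
      rw [PySem.List.sum_map_add_int, ih (s + 1) (by omega),
        pvSumSingle _ _ _ _ (by decide)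
          (by
            rw [PySem.List.mem_pyRange_one]
            exact ⟨PySem.Int.mod_nonneg s (by norm_num), PySem.Int.mod_lt s (by norm_num)⟩),
        pvScoreFrom_cons]
      have hmm : PySem.Int.mod (PySem.Int.mod s 40) (List.length p : Int)
          = PySem.Int.mod s (List.length p : Int) := by
        rw [PySem.Int.mod_eq_emod_of_pos hlen, PySem.Int.mod_eq_emod_of_pos hlen,
          PySem.Int.mod_eq_emod_of_pos (by norm_num : (0:Int) < 40)]
        exact Int.emod_emod_of_dvd s hdvd
      rw [hmm, PySem.Int.mod_eq_emod_of_pos hlen]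
      ring

-- the histogram-building loop of B, characterised: lookup = count of the mapped key list
lemma pvCnt (l : List (Int × Int)) (d : PySem.Dict (Int × Int) Int) (v : Int × Int) :
    (l.foldl
        (fun d ia => d.insert (PySem.Int.mod ia.1 40, ia.2)
          (d.getD (PySem.Int.mod ia.1 40, ia.2) 0 + 1)) d).getD v 0
      = d.getD v 0 + (((l.map (fun ia => ((PySem.Int.mod ia.1 40, ia.2) : Int × Int))).count v : Nat) : Int) := by
  induction l generalizing d with
  | nil => simp
  | cons ia l ih =>
      rw [List.foldl_cons, ih, List.map_cons, List.count_cons]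
      rw [PySem.Dict.getD_insert]
      push_cast
      split_ifs with h1 h2 h2 <;> (simp_all; try ring)

-- ===== VERDICT (by name: the statement is the Claim_ definition above) =====
theorem solution_spec : Claim_equal_solution := by
  intro answers _
  show solution answers = solution_alt answers
  simp only [solution, solution_alt]
  rw [pvMain]
  simp only [pvCnt, PySem.Dict.getD_empty, zero_add, List.map_cons, List.map_nil]
  rw [pvMainB [1, 2, 3, 4, 5] (by decide) (by decide) answers 0 le_rfl,
    pvMainB [2, 1, 2, 3, 2, 4, 2, 5] (by decide) (by decide) answers 0 le_rfl,
    pvMainB [3, 3, 1, 1, 2, 2, 4, 4, 5, 5] (by decide) (by decide) answers 0 le_rfl]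
  norm_num [pvItems_mk, PySem.List.enumerate_cons, PySem.List.enumerate_nil,
    List.filterMap_cons, List.filterMap_nil]
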